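-- pv_equiv track=rewrite | github.com/pypi-data/pypi-mirror-367 | packages/pylint-sort-functions/pylint_sort_functions-1.0.0.tar.gz/pylint_sort_functions-1.0.0/src/pylint_sort_functions/auto_fix.py | _find_comments_above_function
-- ===== SOURCE A (Python) =====
-- from typing import List, Optional, Tuple
--
-- def _find_comments_above_function(
--     lines: List[str], function_start_line: int
-- ) -> int:
--     """Find comments that belong to a function and return the start line.
--
--     Scans backwards from the function definition to find associated comments.
--
--     :param lines: Source file lines
--     :type lines: List[str]
--     :param function_start_line: The line where the function starts (0-based)
--     :type function_start_line: int
--     :returns: The line number where comments start, or function_start_line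
--     :rtype: int
--     """
--     comment_start_line = function_start_line
--
--     # Scan backwards from the function start to find comments
--     current_line = function_start_line - 1
--
--     while current_line >= 0:
--         line = lines[current_line].strip()
--
--         # If we find a comment line, this could be part of the function's comments
--         if line.startswith("#"):
--             comment_start_line = current_line
--             current_line -= 1
--             continue
--
--         # If we find an empty line, continue scanning (comments might be separated)
--         if line == "":
--             current_line -= 1
--             continue
--
--         # If we find any other content, stop scanning
--         break
--
--     return comment_start_line
-- ===== SOURCE B (Python) =====
-- def _find_comments_above_function(lines, function_start_line):
--     # Boundary pass: last non-empty, non-comment line before the function.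
--     boundary = 0
--     for i in range(min(function_start_line, len(lines))):
--         s = lines[i].strip()
--         if s != "" and not s.startswith("#"):
--             boundary = i + 1
--     # Forward pass: first comment line between boundary and the function.
--     for i in range(boundary, function_start_line):
--         if lines[i].strip().startswith("#"):
--             return i
--     return function_start_line
-- ===== Notes on version B (the rewrite author's own statement) =====
-- stated objective: alternative
-- what changed: Replaces A's single backward scan that accumulates the lowest comment line seen with two passes: a forward boundary pass finding the last non-empty non-comment line, then a forward scan returning the first comment line after that boundary.
import Mathlib
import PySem

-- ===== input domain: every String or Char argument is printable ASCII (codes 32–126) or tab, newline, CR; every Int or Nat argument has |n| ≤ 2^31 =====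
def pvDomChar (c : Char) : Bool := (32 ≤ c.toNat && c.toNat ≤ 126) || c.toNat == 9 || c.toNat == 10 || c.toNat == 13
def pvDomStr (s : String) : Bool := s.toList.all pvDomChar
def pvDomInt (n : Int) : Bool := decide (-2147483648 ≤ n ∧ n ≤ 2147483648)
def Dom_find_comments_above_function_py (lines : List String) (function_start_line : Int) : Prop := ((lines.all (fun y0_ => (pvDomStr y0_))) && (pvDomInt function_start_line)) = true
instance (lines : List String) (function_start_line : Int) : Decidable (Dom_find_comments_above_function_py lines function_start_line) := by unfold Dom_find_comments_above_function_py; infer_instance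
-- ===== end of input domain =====

-- B replaces A's single backward accumulating scan with a boundary-finding pass plus a
-- forward first-comment pass (alternative decomposition; same cost).

-- lines[i].strip() — shared helper of both ports; the .getD "" arm is Python's
-- IndexError case, unreachable under Pre_.
def pvLineAt (lines : List String) (i : Int) : String :=
  PySem.Str.strip ((PySem.List.pyGet? lines i).getD "")

-- ===== PORT A =====
-- A's while-loop, scanning backwards; the Nat argument n stands for current_line + 1
-- (n = 0 ↔ current_line < 0, loop exit).
def findA_loop (lines : List String) (csl : Int) : Nat → Int
  | 0 => csl
  | n + 1 =>
    if PySem.Str.startswith (pvLineAt lines (n : Int)) "#" then findA_loop lines (n : Int) n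
    else if pvLineAt lines (n : Int) = "" then findA_loop lines csl n
    else csl

def find_comments_above_function_py (lines : List String) (function_start_line : Int) : Int :=
  findA_loop lines function_start_line function_start_line.toNat

-- ===== PORT B =====
-- first pass: boundary = 1 + index of the last non-empty non-comment line in the scanned prefix
def findB_boundary (lines : List String) (m : Nat) : Nat :=
  (List.range m).foldl
    (fun (b i : Nat) =>
      if pvLineAt lines (i : Int) ≠ "" ∧ ¬ PySem.Str.startswith (pvLineAt lines (i : Int)) "#"
      then i + 1 else b) 0

-- second pass: first comment line at index ≥ i and < fsl, else fsl
def findB_scan (lines : List String) (fsl : Int) (i : Int) : Int :=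
  if _h : i < fsl then
    if PySem.Str.startswith (pvLineAt lines i) "#" then i
    else findB_scan lines fsl (i + 1)
  else fsl
termination_by (fsl - i).toNat
decreasing_by omega

def find_comments_above_function_py_alt (lines : List String) (function_start_line : Int) : Int :=
  findB_scan lines function_start_line
    ((findB_boundary lines (min function_start_line (lines.length : Int)).toNat : Nat) : Int)

-- ===== PRECONDITION & SPEC =====
-- Pre_ excludes exactly the inputs where the Python A raises IndexError
-- (function_start_line - 1 ≥ len(lines)); A returns on everything admitted.
def Pre_find_comments_above_function_py (lines : List String) (function_start_line : Int) : Prop :=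
  function_start_line ≤ (lines.length : Int)
instance (lines : List String) (function_start_line : Int) : Decidable (Pre_find_comments_above_function_py lines function_start_line) := by unfold Pre_find_comments_above_function_py; infer_instance

def pvWitness_find_comments_above_function_py : List String × Int := (["# note", "", "# more", "def f():"], 3)

def Spec_find_comments_above_function_py (lines : List String) (function_start_line : Int) (out : Int) : Prop := out = find_comments_above_function_py_alt lines function_start_line
instance (lines : List String) (function_start_line : Int) (out : Int) : Decidable (Spec_find_comments_above_function_py lines function_start_line out) := by unfold Spec_find_comments_above_function_py; infer_instance

-- ===== CLAIM (what is proved, stated in full; the proofs are below) =====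
def Claim_equal_find_comments_above_function_py : Prop := ∀ (lines : List String) (function_start_line : Int), Dom_find_comments_above_function_py lines function_start_line → Pre_find_comments_above_function_py lines function_start_line → Spec_find_comments_above_function_py lines function_start_line (find_comments_above_function_py lines function_start_line)

-- ===== LEMMAS AND PROOFS =====

-- the comment test both ports apply to line index i
def pvIsC (lines : List String) (i : Nat) : Bool :=
  PySem.Str.startswith (pvLineAt lines (i : Int)) "#"

theorem range'_concat_one (s n : Nat) : List.range' s (n + 1) = List.range' s n ++ [s + n] := by
  simpa using List.range'_concat (s := s) (n := n) (step := 1)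

theorem findB_boundary_le (lines : List String) (n : Nat) : findB_boundary lines n ≤ n := by
  induction n with
  | zero => simp [findB_boundary]
  | succ n ih =>
    unfold findB_boundary at *
    rw [List.range_succ, List.foldl_append]
    simp only [List.foldl_cons, List.foldl_nil]
    split <;> omega

theorem findB_boundary_succ (lines : List String) (n : Nat) :
    findB_boundary lines (n + 1) =
      if (pvLineAt lines (n : Int) ≠ "" ∧ ¬ pvIsC lines n)
      then n + 1 else findB_boundary lines n := by
  unfold findB_boundary pvIsC
  rw [List.range_succ, List.foldl_append]
  simp only [List.foldl_cons, List.foldl_nil]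

theorem findA_loop_succ (lines : List String) (csl : Int) (n : Nat) :
    findA_loop lines csl (n + 1) =
      if pvIsC lines n then findA_loop lines (n : Int) n
      else if pvLineAt lines (n : Int) = "" then findA_loop lines csl n
      else csl := rfl

-- A's loop computes: the first comment index in [boundary n, n), else csl.
theorem findA_loop_eq (lines : List String) (csl : Int) (n : Nat) :
    findA_loop lines csl n =
      match (List.range' (findB_boundary lines n) (n - findB_boundary lines n)).find? (pvIsC lines) with
      | some i => (i : Int)
      | none => csl := by
  induction n generalizing csl with
  | zero => simp [findA_loop, findB_boundary]
  | succ n ih =>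
    have hb := findB_boundary_le lines n
    rw [findA_loop_succ, findB_boundary_succ]
    by_cases hc : pvIsC lines n = true
    · rw [if_pos hc, if_neg (by simp [hc])]
      have hrange : List.range' (findB_boundary lines n) (n + 1 - findB_boundary lines n)
          = List.range' (findB_boundary lines n) (n - findB_boundary lines n) ++ [n] := by
        have h1 : n + 1 - findB_boundary lines n = (n - findB_boundary lines n) + 1 := by omega
        have h2 : findB_boundary lines n + (n - findB_boundary lines n) = n := by omega
        rw [h1, range'_concat_one, h2]
      rw [hrange, List.find?_append, ih]
      cases hfind : (List.range' (findB_boundary lines n) (n - findB_boundary lines n)).find? (pvIsC lines) with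
      | some i => simp
      | none => simp [List.find?, hc]
    · rw [if_neg hc]
      by_cases hs : pvLineAt lines (n : Int) = ""
      · rw [if_pos hs, if_neg (by simp [hs])]
        have hrange : List.range' (findB_boundary lines n) (n + 1 - findB_boundary lines n)
            = List.range' (findB_boundary lines n) (n - findB_boundary lines n) ++ [n] := by
          have h1 : n + 1 - findB_boundary lines n = (n - findB_boundary lines n) + 1 := by omega
          have h2 : findB_boundary lines n + (n - findB_boundary lines n) = n := by omega
          rw [h1, range'_concat_one, h2]
        rw [hrange, List.find?_append, ih]
        cases hfind : (List.range' (findB_boundary lines n) (n - findB_boundary lines n)).find? (pvIsC lines) with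
        | some i => simp
        | none => simp [List.find?, hc]
      · rw [if_neg hs, if_pos ⟨hs, by simpa using hc⟩]
        simp

-- B's scan computes: the first comment index in [lo, fsl.toNat), else fsl.
theorem findB_scan_eq (lines : List String) (fsl : Int) (lo : Nat) :
    findB_scan lines fsl (lo : Int) =
      match (List.range' lo (fsl.toNat - lo)).find? (pvIsC lines) with
      | some i => (i : Int)
      | none => fsl := by
  by_cases h : (lo : Int) < fsl
  · have hlt : lo < fsl.toNat := by omega
    have hk : fsl.toNat - lo = (fsl.toNat - (lo + 1)) + 1 := by omega
    rw [hk, List.range'_succ]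
    unfold findB_scan
    rw [dif_pos h]
    by_cases hc : pvIsC lines lo = true
    · rw [if_pos (by simpa [pvIsC] using hc), List.find?_cons_of_pos hc]
    · rw [if_neg (by simpa [pvIsC] using hc), List.find?_cons_of_neg (by simpa using hc)]
      have hcast : ((lo : Int) + 1) = ((lo + 1 : Nat) : Int) := by push_cast; ring
      rw [hcast, findB_scan_eq lines fsl (lo + 1)]
  · have hz : fsl.toNat - lo = 0 := by omega
    unfold findB_scan
    rw [dif_neg h, hz]
    simp
termination_by (fsl.toNat - lo)
decreasing_by omega

-- ===== VERDICT (by name: the statement is the Claim_ definition above) =====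
theorem find_comments_above_function_py_spec : Claim_equal_find_comments_above_function_py := by
  intro lines fsl _ hpre
  unfold Spec_find_comments_above_function_py find_comments_above_function_py find_comments_above_function_py_alt
  have hmin : min fsl (lines.length : Int) = fsl := min_eq_left hpre
  rw [hmin, findB_scan_eq, findA_loop_eq]
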